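-- pv_equiv track=rewrite | github.com/tcardella/AdventOfCode | 2024/test_2024_09.py | find_last_values
-- ===== SOURCE A (Python) =====
-- def find_last_values(s):
--     start = len(s)
--     end = len(s)
--     last_val = s[-1]
--     for i in range(len(s) - 1, -1, -1):
--         if s[i] == '.' and s[i] == last_val:
--             end -= 1
--             start -= 1
--
--         elif s[i] != '.' and s[i] == last_val:
--             start -= 1
--
--         elif s[i] != '.' and s[i] != last_val:
--             break
--
--         elif s[i] == '.' and s[i] != last_val:
--             break
--
--         last_val = s[i]
--
--     return start, end
-- ===== SOURCE B (Python) =====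
-- def find_last_values(s):
--     c = s[-1]
--     n = len(s)
--     # binary search for the largest m with s[n-m:] == c*m (monotone predicate)
--     lo, hi = 1, n
--     while lo < hi:
--         mid = (lo + hi + 1) // 2
--         if s[n - mid:] == c * mid:
--             lo = mid
--         else:
--             hi = mid - 1
--     start = n - lo
--     end = n if c != '.' else start
--     return start, end
-- ===== Notes on version B (the rewrite author's own statement) =====
-- stated objective: alternative
-- what changed: Replaces A's backward character-by-character loop with two counters by a binary search over candidate run lengths: whether the suffix of length m consists entirely of the last character is monotone in m, so the largest such m is found by bisection and both indices are derived arithmetically from it.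
import Mathlib
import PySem

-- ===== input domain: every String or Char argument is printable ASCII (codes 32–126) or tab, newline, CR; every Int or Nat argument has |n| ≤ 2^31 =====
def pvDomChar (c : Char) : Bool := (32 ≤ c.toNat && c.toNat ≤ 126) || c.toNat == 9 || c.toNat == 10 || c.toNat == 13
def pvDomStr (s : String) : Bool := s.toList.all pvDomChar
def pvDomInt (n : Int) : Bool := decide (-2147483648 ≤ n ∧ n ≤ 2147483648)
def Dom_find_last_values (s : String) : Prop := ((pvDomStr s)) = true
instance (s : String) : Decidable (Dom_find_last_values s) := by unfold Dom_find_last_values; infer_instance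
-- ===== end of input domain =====

-- B finds the trailing-run length by binary search on the monotone predicate s[n-m:] == c*m and
-- derives both indices from it, instead of A's backward loop with two counters (objective: alternative).


-- ===== PORT A =====
-- the backward for-loop of A: state (start, end, last_val); break returns the state
def findLoopA (cs : List Char) : List Int → Int → Int → Char → Int × Int
  | [], st, en, _ => (st, en)
  | i :: rest, st, en, lv =>
    match PySem.List.pyGet? cs i with
    | none => (st, en)   -- unreachable: loop indices are in range
    | some c =>
      if c = '.' ∧ c = lv then findLoopA cs rest (st - 1) (en - 1) c
      else if c ≠ '.' ∧ c = lv then findLoopA cs rest (st - 1) en c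
      else (st, en)      -- both remaining branches break

def find_last_values (s : String) : Int × Int :=
  let cs := s.toList
  let start : Int := cs.length
  let en : Int := cs.length
  match PySem.List.pyGet? cs (-1) with
  | none => (start, en)  -- Python raises IndexError on s[-1]; excluded by Pre_
  | some lv => findLoopA cs (PySem.List.pyRange ((cs.length : Int) - 1) (-1) (-1)) start en lv

-- ===== PORT B =====
-- the while-loop of B: binary search for the largest m in [lo, hi] with cs[n-m:] == [c]*m
def bsearchB (cs : List Char) (c : Char) (n : Int) (lo hi : Int) : Int :=
  if lo < hi then
    let mid := PySem.Int.floordiv (lo + hi + 1) 2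
    if PySem.List.slice cs (some (n - mid)) none = PySem.List.pyRepeat [c] mid then
      bsearchB cs c n mid hi
    else
      bsearchB cs c n lo (mid - 1)
  else lo
termination_by (hi - lo).toNat
decreasing_by
  all_goals
    have h2 := PySem.Int.floordiv_eq_ediv_of_pos (a := lo + hi + 1) (b := 2) (by norm_num)
    simp only [h2] at *
    omega

def find_last_values_alt (s : String) : Int × Int :=
  let cs := s.toList
  match PySem.List.pyGet? cs (-1) with
  | none => (0, 0)       -- Python raises IndexError on s[-1]; excluded by Pre_
  | some c =>
    let n : Int := cs.length
    let lo := bsearchB cs c n 1 n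
    let start := n - lo
    (start, if c ≠ '.' then n else start)

-- ===== PRECONDITION & SPEC =====
-- A (and B) index s[-1], which raises IndexError on the empty string; Pre_ excludes exactly that.
def Pre_find_last_values (s : String) : Prop := s.toList ≠ []
instance (s : String) : Decidable (Pre_find_last_values s) := by unfold Pre_find_last_values; infer_instance
def pvWitness_find_last_values : String := "ab.."

def Spec_find_last_values (s : String) (out : Int × Int) : Prop := out = find_last_values_alt s
instance (s : String) (out : Int × Int) : Decidable (Spec_find_last_values s out) := by unfold Spec_find_last_values; infer_instance

-- ===== CLAIM (what is proved, stated in full; the proofs are below) =====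
def Claim_equal_find_last_values : Prop := ∀ (s : String), Dom_find_last_values s → Pre_find_last_values s → Spec_find_last_values s (find_last_values s)

-- ===== LEMMAS AND PROOFS =====

-- A's loop over indices [m-1, …, 0] equals the same loop over the reversed prefix of chars.
def findLoopR : List Char → Int → Int → Char → Int × Int
  | [], st, en, _ => (st, en)
  | c :: rest, st, en, lv =>
    if c = '.' ∧ c = lv then findLoopR rest (st - 1) (en - 1) c
    else if c ≠ '.' ∧ c = lv then findLoopR rest (st - 1) en c
    else (st, en)

theorem findLoopA_eq_findLoopR (cs : List Char) :
    ∀ (m : ℕ), m ≤ cs.length → ∀ (st en : Int) (lv : Char),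
    findLoopA cs (PySem.List.pyRange ((m : Int) - 1) (-1) (-1)) st en lv =
      findLoopR ((cs.take m).reverse) st en lv := by
  intro m
  induction m with
  | zero =>
    intro _ st en lv
    rw [PySem.List.pyRange_neg_one_eq_nil (by norm_num)]
    simp [findLoopA, findLoopR]
  | succ k ih =>
    intro hm st en lv
    rw [show ((k + 1 : ℕ) : Int) - 1 = (k : Int) by push_cast; ring]
    rw [PySem.List.pyRange_neg_one_cons (by omega)]
    have hk : k < cs.length := hm
    have hget : PySem.List.pyGet? cs (k : Int) = some cs[k] := by
      rw [PySem.List.pyGet?_natCast]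
      simp [hk]
    have htake : (cs.take (k + 1)).reverse = cs[k] :: (cs.take k).reverse := by
      rw [List.take_add_one, List.getElem?_eq_getElem hk]
      simp
    rw [htake]
    simp only [findLoopA, findLoopR, hget]
    split_ifs with h1 h2
    · exact ih (le_of_lt hk) _ _ _
    · exact ih (le_of_lt hk) _ _ _
    · rfl

-- closed form of the loop over the reversed list, started with lv = the head-to-come:
-- lv stays constant along the matched run, so the run is the takeWhile (= lv) prefix.
theorem findLoopR_closed (rs : List Char) : ∀ (st en : Int) (c0 : Char),
    findLoopR rs st en c0 =
      (st - ((rs.takeWhile (· == c0)).length : Int),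
       if c0 = '.' then en - ((rs.takeWhile (· == c0)).length : Int) else en) := by
  induction rs with
  | nil => intro st en c0; simp [findLoopR]
  | cons c rest ih =>
    intro st en c0
    by_cases hc : c = c0
    · subst hc
      rw [List.takeWhile_cons_of_pos (by simp)]
      by_cases hdot : c = '.'
      · subst hdot
        rw [show findLoopR ('.' :: rest) st en '.' = findLoopR rest (st - 1) (en - 1) '.'
              from by simp [findLoopR]]
        rw [ih]
        simp only [List.length_cons, Prod.mk.injEq]
        constructor <;> (push_cast; ring)
      · rw [show findLoopR (c :: rest) st en c = findLoopR rest (st - 1) en c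
              from by simp [findLoopR, hdot]]
        rw [ih]
        simp only [if_neg hdot, List.length_cons, Prod.mk.injEq]
        refine ⟨by push_cast; ring, by trivial⟩
    · rw [show findLoopR (c :: rest) st en c0 = (st, en) from by simp [findLoopR, hc]]
      rw [List.takeWhile_cons_of_neg (by simp [hc])]
      simp

-- a prefix equals replicate m c exactly when the (= c)-run is at least m long
theorem take_replicate_iff (c : Char) : ∀ (l : List Char) (m : ℕ),
    l.take m = List.replicate m c ↔ m ≤ (l.takeWhile (· == c)).length := by
  intro l
  induction l with
  | nil =>
    intro m
    cases m <;> simp [List.replicate_succ]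
  | cons a rest ih =>
    intro m
    cases m with
    | zero => simp
    | succ k =>
      by_cases ha : a = c
      · subst ha
        rw [List.takeWhile_cons_of_pos (by simp)]
        simp only [List.take_succ_cons, List.replicate_succ, List.cons.injEq, List.length_cons]
        rw [ih k]
        simp only [true_and]
        omega
      · rw [List.takeWhile_cons_of_neg (by simp [ha])]
        simp [List.replicate_succ, ha]

-- the binary-search predicate of B is monotone: it holds exactly for m ≤ run length L
theorem predB_iff (cs : List Char) (c : Char) (m : Int)
    (h1 : 1 ≤ m) (hn : m ≤ (cs.length : Int)) :
    (PySem.List.slice cs (some ((cs.length : Int) - m)) none = PySem.List.pyRepeat [c] m)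
      ↔ m ≤ ((cs.reverse.takeWhile (· == c)).length : Int) := by
  obtain ⟨k, rfl⟩ : ∃ k : ℕ, m = (k : Int) := ⟨m.toNat, by omega⟩
  have hk : k ≤ cs.length := by exact_mod_cast hn
  rw [PySem.List.pyRepeat_singleton]
  rw [show ((cs.length : Int) - (k : Int)) = ((cs.length - k : ℕ) : Int) by omega]
  rw [PySem.List.slice_from_natCast]
  have hdrop : cs.drop (cs.length - k) = (cs.reverse.take k).reverse := by
    rw [List.reverse_take, List.length_reverse, List.reverse_reverse]
  rw [hdrop, show ((k : Int)).toNat = k by omega]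
  constructor
  · intro h
    have : cs.reverse.take k = List.replicate k c := by
      have := congrArg List.reverse h
      simpa using this
    exact_mod_cast (take_replicate_iff c cs.reverse k).mp this
  · intro h
    have := (take_replicate_iff c cs.reverse k).mpr (by exact_mod_cast h)
    simp [this]

-- binary-search correctness against any monotone predicate level L
theorem bsearchB_eq (cs : List Char) (c : Char) (n L : Int)
    (hP : ∀ m : Int, 1 ≤ m → m ≤ n →
      ((PySem.List.slice cs (some (n - m)) none = PySem.List.pyRepeat [c] m) ↔ m ≤ L)) :
    ∀ (k : ℕ) (lo hi : Int), (hi - lo).toNat = k → 1 ≤ lo → lo ≤ L → L ≤ hi → hi ≤ n →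
    bsearchB cs c n lo hi = L := by
  intro k
  induction k using Nat.strong_induction_on with
  | _ k ih =>
    intro lo hi hk h1 hlo hhi hn
    rw [bsearchB]
    by_cases hlt : lo < hi
    · rw [if_pos hlt]
      have h2 := PySem.Int.floordiv_eq_ediv_of_pos (a := lo + hi + 1) (b := 2) (by norm_num)
      have hb : lo < PySem.Int.floordiv (lo + hi + 1) 2 ∧ PySem.Int.floordiv (lo + hi + 1) 2 ≤ hi := by
        rw [h2]; omega
      set mid := PySem.Int.floordiv (lo + hi + 1) 2 with hmid
      by_cases hp : PySem.List.slice cs (some (n - mid)) none = PySem.List.pyRepeat [c] mid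
      · rw [if_pos hp]
        have hmL : mid ≤ L := (hP mid (by omega) (by omega)).mp hp
        exact ih (hi - mid).toNat (by omega) mid hi rfl (by omega) hmL hhi hn
      · rw [if_neg hp]
        have hmL : ¬ mid ≤ L := fun h => hp ((hP mid (by omega) (by omega)).mpr h)
        exact ih (mid - 1 - lo).toNat (by omega) lo (mid - 1) rfl h1 hlo (by omega) (by omega)
    · rw [if_neg hlt]
      omega

-- ===== VERDICT =====
theorem find_last_values_spec : Claim_equal_find_last_values := by
  intro s _ hpre
  unfold Spec_find_last_values find_last_values find_last_values_alt
  have hpre' : s.toList ≠ [] := hpre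
  revert hpre'
  generalize s.toList = cs
  intro hne
  have hget : PySem.List.pyGet? cs (-1) = some (cs.getLast hne) := by
    rw [PySem.List.pyGet?_neg_one, List.getLast?_eq_some_getLast hne]
  simp only [hget]
  set c := cs.getLast hne with hc
  set L : Int := ((cs.reverse.takeWhile (· == c)).length : Int) with hL
  -- bounds on L
  have ht : cs.reverse = c :: cs.dropLast.reverse := by
    conv_lhs => rw [← List.dropLast_append_getLast hne]
    simp [hc]
  have hL1 : 1 ≤ L := by
    rw [hL, ht, List.takeWhile_cons_of_pos (by simp)]
    simp
  have hLn : L ≤ (cs.length : Int) := by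
    rw [hL]
    have := (List.takeWhile_sublist (l := cs.reverse) (p := (· == c))).length_le
    simp only [List.length_reverse] at this
    exact_mod_cast this
  -- B's binary search returns L
  have hB : bsearchB cs c (cs.length : Int) 1 (cs.length : Int) = L :=
    bsearchB_eq cs c (cs.length : Int) L (fun m h1 hn => predB_iff cs c m h1 hn)
      ((cs.length : Int) - 1).toNat 1 (cs.length : Int) rfl le_rfl hL1 hLn le_rfl
  -- A's loop computes the closed form with the same L
  rw [findLoopA_eq_findLoopR cs cs.length le_rfl]
  rw [List.take_length, findLoopR_closed, hB]
  by_cases hdot : c = '.'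
  · rw [if_pos hdot, if_neg (not_not_intro hdot)]
  · rw [if_neg hdot, if_pos hdot]
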